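-- pv_equiv track=rewrite | github.com/thehalleyyoung/deppy | tests/test_equivalence/test_hard_eq_pairs.py | neq26b
-- ===== SOURCE A (Python) =====
-- def neq26b(lst):
--     """Manual loop, no short-circuit — examines all."""
--     count = 0
--     result = False
--     for x in lst:
--         count += 1
--         if x:
--             result = True
--         # does NOT break — examines all elements
--     return (result, count)
-- ===== SOURCE B (Python) =====
-- def neq26b(lst):
--     """Materialize once, then use library any/len."""
--     items = list(lst)
--     return (any(items), len(items))
-- ===== Notes on version B (the rewrite author's own statement) =====
-- stated objective: idiomatic
-- what changed: Replaced the manual accumulating loop with materializing the iterable once and applying the library operations any() and len() over the stored list.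
import Mathlib
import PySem

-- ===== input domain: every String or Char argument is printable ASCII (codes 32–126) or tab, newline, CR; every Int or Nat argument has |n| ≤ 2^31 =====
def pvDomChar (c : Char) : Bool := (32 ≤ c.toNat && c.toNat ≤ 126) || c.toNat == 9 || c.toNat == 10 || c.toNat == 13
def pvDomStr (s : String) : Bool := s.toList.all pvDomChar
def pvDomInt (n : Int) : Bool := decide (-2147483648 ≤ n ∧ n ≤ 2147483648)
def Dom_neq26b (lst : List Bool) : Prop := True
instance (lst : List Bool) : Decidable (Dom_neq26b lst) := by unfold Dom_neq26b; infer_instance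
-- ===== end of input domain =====

-- B materializes the list once and uses library any/len instead of A's manual accumulating loop (idiomatic; return value only).

-- ===== PORT A =====
-- literal port of A's loop over state (count, result)
def neq26b (lst : List Bool) : Bool × Int :=
  let st := lst.foldl (fun (st : Int × Bool) x =>
    let count := st.1 + 1
    let result := if x then true else st.2
    (count, result)) (0, false)
  (st.2, st.1)

-- ===== PORT B =====
-- literal port of B: items = list(lst); (any(items), len(items))
def neq26b_alt (lst : List Bool) : Bool × Int :=
  let items := lst
  (items.any id, (items.length : Int))

-- ===== PRECONDITION & SPEC =====
def Spec_neq26b (lst : List Bool) (out : Bool × Int) : Prop := out = neq26b_alt lst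
instance (lst : List Bool) (out : Bool × Int) : Decidable (Spec_neq26b lst out) := by unfold Spec_neq26b; infer_instance

-- ===== CLAIM (what is proved, stated in full; the proofs are below) =====
def Claim_equal_neq26b : Prop := ∀ (lst : List Bool), Dom_neq26b lst → Spec_neq26b lst (neq26b lst)

-- ===== LEMMAS AND PROOFS =====
theorem neq26b_foldl (lst : List Bool) (c : Int) (r : Bool) :
    lst.foldl (fun (st : Int × Bool) x =>
      (st.1 + 1, if x then true else st.2)) (c, r)
      = (c + lst.length, r || lst.any id) := by
  induction lst generalizing c r with
  | nil => simp
  | cons x xs ih =>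
    simp only [List.foldl_cons, List.any_cons, ih, List.length_cons]
    cases x <;> simp <;> push_cast <;> ring

-- ===== VERDICT (by name: the statement is the Claim_ definition above) =====
theorem neq26b_spec : Claim_equal_neq26b := by
  intro lst _
  unfold Spec_neq26b neq26b neq26b_alt
  simp only [neq26b_foldl]
  simp
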